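-- pv_equiv track=rewrite | github.com/girishsardar44/MT_Airport_Digital_Mockup | v2/src/fileSystem.py | findAllInputFiles
-- ===== SOURCE A (Python) =====
-- def findAllInputFiles(listOfFiles):
--     files = {
--         'runways': '',
--         'obstacles': '',
--         'terminalStands': ''
--     }
--     for file in listOfFiles:
--         if file.endswith('runways.pdf'):
--             files['runways'] = file
--         if file.endswith('terminalStands.pdf'):
--             files['terminalStands'] = file
--         if file.endswith('obstacles.csv'):
--             files['obstacles'] = file
--     return files
-- ===== SOURCE B (Python) =====
-- def findAllInputFiles(listOfFiles):
--     def lastMatch(suffix):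
--         for f in reversed(listOfFiles):
--             if f.endswith(suffix):
--                 return f
--         return ''
--     return {
--         'runways': lastMatch('runways.pdf'),
--         'obstacles': lastMatch('obstacles.csv'),
--         'terminalStands': lastMatch('terminalStands.pdf')
--     }
-- ===== Notes on version B (the rewrite author's own statement) =====
-- stated objective: simpler
-- what changed: Replaced the single stateful loop mutating a dict via three if-branches by three independent last-match searches (first match over the reversed list, defaulting to ''), one per key, from which the result dict is built directly.
import Mathlib
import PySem

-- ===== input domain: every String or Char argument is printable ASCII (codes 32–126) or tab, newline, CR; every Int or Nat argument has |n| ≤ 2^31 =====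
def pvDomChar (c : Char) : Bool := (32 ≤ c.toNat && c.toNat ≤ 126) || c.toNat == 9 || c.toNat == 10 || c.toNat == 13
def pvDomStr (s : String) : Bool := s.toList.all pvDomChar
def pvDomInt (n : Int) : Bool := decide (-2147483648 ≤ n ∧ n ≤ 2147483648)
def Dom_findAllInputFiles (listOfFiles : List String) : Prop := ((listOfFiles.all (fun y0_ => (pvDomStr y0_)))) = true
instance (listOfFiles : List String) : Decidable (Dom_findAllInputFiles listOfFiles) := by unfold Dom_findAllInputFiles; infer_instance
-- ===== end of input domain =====

-- B replaces the single loop with three if-branches mutating a dict by three independent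
-- last-match-with-default-'' searches over the reversed list; objective: simpler.
-- ===== PORT A =====
def findAllInputFiles (listOfFiles : List String) : List (String × String) :=
  let files : PySem.Dict String String :=
    PySem.Dict.ofList [("runways", ""), ("obstacles", ""), ("terminalStands", "")]
  (listOfFiles.foldl (fun files file =>
    let files := if PySem.Str.endswith file "runways.pdf" then files.insert "runways" file else files
    let files := if PySem.Str.endswith file "terminalStands.pdf" then files.insert "terminalStands" file else files
    let files := if PySem.Str.endswith file "obstacles.csv" then files.insert "obstacles" file else files
    files) files).items

-- ===== PORT B =====
-- 'for f in reversed(listOfFiles): if f.endswith(suffix): return f / return  as structural recursion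
def pvLastMatchGo (suffix : String) : List String → String
  | [] => ""
  | f :: rest => if PySem.Str.endswith f suffix then f else pvLastMatchGo suffix rest

def findAllInputFiles_alt (listOfFiles : List String) : List (String × String) :=
  let lastMatch := fun (suffix : String) => pvLastMatchGo suffix listOfFiles.reverse
  [("runways", lastMatch "runways.pdf"),
   ("obstacles", lastMatch "obstacles.csv"),
   ("terminalStands", lastMatch "terminalStands.pdf")]

-- ===== PRECONDITION & SPEC =====
def Spec_findAllInputFiles (listOfFiles : List String) (out : List (String × String)) : Prop := out = findAllInputFiles_alt listOfFiles
instance (listOfFiles : List String) (out : List (String × String)) : Decidable (Spec_findAllInputFiles listOfFiles out) := by unfold Spec_findAllInputFiles; infer_instance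

-- ===== CLAIM (what is proved, stated in full; the proofs are below) =====
def Claim_equal_findAllInputFiles : Prop := ∀ (listOfFiles : List String), Dom_findAllInputFiles listOfFiles → Spec_findAllInputFiles listOfFiles (findAllInputFiles listOfFiles)

-- ===== LEMMAS AND PROOFS =====

-- pvLastMatchGo is first match = find?.getD ""
theorem pvLastMatchGo_eq_find? (suffix : String) (l : List String) :
    pvLastMatchGo suffix l = ((l.find? (fun f => PySem.Str.endswith f suffix)).getD "") := by
  induction l with
  | nil => rfl
  | cons f rest ih =>
    simp only [pvLastMatchGo, List.find?]
    cases h : PySem.Str.endswith f suffix <;> simp only [ih] <;> rfl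

-- the keep-last-match foldl equals first match of the reverse, with the accumulator as default
theorem foldl_last_eq_find?_reverse (p : String → Bool) (xs : List String) (acc : String) :
    xs.foldl (fun a f => if p f then f else a) acc
      = ((xs.reverse.find? p).getD acc) := by
  induction xs generalizing acc with
  | nil => rfl
  | cons x rest ih =>
    simp only [List.foldl, List.reverse_cons, List.find?_append, ih]
    cases h : rest.reverse.find? p <;> cases hx : p x <;>
      simp [hx, Option.or, List.find?]

-- the fold of A keeps the dict in its three-entry shape, each slot a keep-last fold
theorem foldA_shape (xs : List String) (a b c : String) :
    xs.foldl (fun files file =>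
      let files := if PySem.Str.endswith file "runways.pdf" then files.insert "runways" file else files
      let files := if PySem.Str.endswith file "terminalStands.pdf" then files.insert "terminalStands" file else files
      let files := if PySem.Str.endswith file "obstacles.csv" then files.insert "obstacles" file else files
      files)
      (PySem.Dict.mk [("runways", a), ("obstacles", b), ("terminalStands", c)])
    = PySem.Dict.mk
        [("runways", xs.foldl (fun v f => if PySem.Str.endswith f "runways.pdf" then f else v) a),
         ("obstacles", xs.foldl (fun v f => if PySem.Str.endswith f "obstacles.csv" then f else v) b),
         ("terminalStands", xs.foldl (fun v f => if PySem.Str.endswith f "terminalStands.pdf" then f else v) c)] := by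
  induction xs generalizing a b c with
  | nil => rfl
  | cons x rest ih =>
    simp only [List.foldl]
    cases h1 : PySem.Str.endswith x "runways.pdf" <;>
      cases h2 : PySem.Str.endswith x "terminalStands.pdf" <;>
      cases h3 : PySem.Str.endswith x "obstacles.csv" <;>
      simp [reduceIte, PySem.Dict.insert, PySem.Dict.contains] at ih ⊢ <;>
      exact ih _ _ _

-- ===== VERDICT (by name: the statement is the Claim_ definition above) =====
theorem findAllInputFiles_spec : Claim_equal_findAllInputFiles := by
  intro xs _
  show findAllInputFiles xs = findAllInputFiles_alt xs
  simp only [findAllInputFiles, findAllInputFiles_alt]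
  rw [show (PySem.Dict.ofList [("runways", ""), ("obstacles", ""), ("terminalStands", "")] : PySem.Dict String String)
      = PySem.Dict.mk [("runways", ""), ("obstacles", ""), ("terminalStands", "")] from by decide]
  rw [foldA_shape]
  simp only [pvLastMatchGo_eq_find?,
    foldl_last_eq_find?_reverse (fun f => PySem.Str.endswith f "runways.pdf"),
    foldl_last_eq_find?_reverse (fun f => PySem.Str.endswith f "obstacles.csv"),
    foldl_last_eq_find?_reverse (fun f => PySem.Str.endswith f "terminalStands.pdf")]
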